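-- pv_equiv track=rewrite | github.com/AlbertChow1997/CleanSlate | backend/app/services/cleanup_service.py | _detect_semantic_columns
-- ===== SOURCE A (Python) =====
-- def _detect_semantic_columns(columns: list[str]) -> dict[str, str]:
--     semantic: dict[str, str] = {}
--     for column in columns:
--         lowered = column.lower()
--         if "email" in lowered:
--             semantic[column] = "email"
--         elif "phone" in lowered or "mobile" in lowered:
--             semantic[column] = "phone"
--         elif "date" in lowered or "signup" in lowered:
--             semantic[column] = "date"
--         elif "country" in lowered:
--             semantic[column] = "country"
--         elif "status" in lowered or "stage" in lowered:
--             semantic[column] = "status"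
--         elif any(token in lowered for token in ("name", "city", "state", "company")):
--             semantic[column] = "title"
--     return semantic
-- ===== SOURCE B (Python) =====
-- _RULES = (
--     (("email",), "email"),
--     (("phone", "mobile"), "phone"),
--     (("date", "signup"), "date"),
--     (("country",), "country"),
--     (("status", "stage"), "status"),
--     (("name", "city", "state", "company"), "title"),
-- )
--
--
-- def _detect_semantic_columns(columns: list[str]) -> dict[str, str]:
--     # Staged sieve: one pass over the data PER RULE (rules outermost), claiming
--     # matching columns and sieving the rest into the next stage; the final dict
--     # is rebuilt in original column order so first-match-wins order is restored.
--     claimed: dict[str, str] = {}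
--     remaining = list(columns)
--     for tokens, label in _RULES:
--         still: list[str] = []
--         for column in remaining:
--             lowered = column.lower()
--             if any(t in lowered for t in tokens):
--                 claimed[column] = label
--             else:
--                 still.append(column)
--         remaining = still
--     return {column: claimed[column] for column in columns if column in claimed}
-- ===== Notes on version B (the rewrite author's own statement) =====
-- stated objective: alternative
-- what changed: Inverted the loop nesting: instead of classifying each column through the branch ladder, B makes one sieve pass over the columns per rule (rules outermost), claiming matches and passing the rest to the next rule, then rebuilds the dict in original column order.
import Mathlib
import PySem

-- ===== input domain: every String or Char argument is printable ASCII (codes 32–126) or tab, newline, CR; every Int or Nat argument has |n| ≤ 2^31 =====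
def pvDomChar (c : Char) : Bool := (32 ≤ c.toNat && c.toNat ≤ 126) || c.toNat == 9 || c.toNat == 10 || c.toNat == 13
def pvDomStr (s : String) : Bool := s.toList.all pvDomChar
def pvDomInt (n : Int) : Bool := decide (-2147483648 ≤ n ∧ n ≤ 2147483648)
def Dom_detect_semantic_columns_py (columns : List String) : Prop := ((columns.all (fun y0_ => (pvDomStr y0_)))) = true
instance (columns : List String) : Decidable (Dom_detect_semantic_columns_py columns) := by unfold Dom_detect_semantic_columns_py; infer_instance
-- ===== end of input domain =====

-- B inverts the loop nesting: one sieve pass over the columns per rule, dict rebuilt in column order (alternative; same cost).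
-- ===== PORT A =====
def detect_semantic_columns_py (columns : List String) : List (String × String) :=
  (columns.foldl (fun semantic column =>
    let lowered := PySem.Str.lower column
    if PySem.Str.isIn "email" lowered then semantic.insert column "email"
    else if PySem.Str.isIn "phone" lowered || PySem.Str.isIn "mobile" lowered then semantic.insert column "phone"
    else if PySem.Str.isIn "date" lowered || PySem.Str.isIn "signup" lowered then semantic.insert column "date"
    else if PySem.Str.isIn "country" lowered then semantic.insert column "country"
    else if PySem.Str.isIn "status" lowered || PySem.Str.isIn "stage" lowered then semantic.insert column "status"
    else if (["name", "city", "state", "company"].any (fun token => PySem.Str.isIn token lowered)) then semantic.insert column "title"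
    else semantic) (PySem.Dict.empty : PySem.Dict String String)).items

-- ===== PORT B =====
-- B's rule table (_RULES)
def pvRules : List (List String × String) :=
  [(["email"], "email"), (["phone", "mobile"], "phone"), (["date", "signup"], "date"),
   (["country"], "country"), (["status", "stage"], "status"),
   (["name", "city", "state", "company"], "title")]

-- one sieve pass of B's inner loop: claim matching columns, keep the rest in order
def pvPass (tokens : List String) (label : String) :
    List String → PySem.Dict String String → List String × PySem.Dict String String
  | [], claimed => ([], claimed)
  | column :: rest, claimed =>
    let lowered := PySem.Str.lower column
    if tokens.any (fun t => PySem.Str.isIn t lowered) then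
      pvPass tokens label rest (claimed.insert column label)
    else
      let (still, d) := pvPass tokens label rest claimed
      (column :: still, d)

-- B's outer loop over the rules
def pvSieve : List (List String × String) → List String → PySem.Dict String String →
    PySem.Dict String String
  | [], _, claimed => claimed
  | (tokens, label) :: rs, remaining, claimed =>
    let (still, d) := pvPass tokens label remaining claimed
    pvSieve rs still d

def detect_semantic_columns_py_alt (columns : List String) : List (String × String) :=
  let claimed := pvSieve pvRules columns (PySem.Dict.empty : PySem.Dict String String)
  (columns.foldl (fun acc column =>
    match claimed.get? column with
    | some label => acc.insert column label
    | none => acc) (PySem.Dict.empty : PySem.Dict String String)).items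

-- ===== PRECONDITION & SPEC =====
def Spec_detect_semantic_columns_py (columns : List String) (out : List (String × String)) : Prop := out = detect_semantic_columns_py_alt columns
instance (columns : List String) (out : List (String × String)) : Decidable (Spec_detect_semantic_columns_py columns out) := by unfold Spec_detect_semantic_columns_py; infer_instance

-- ===== CLAIM (what is proved, stated in full; the proofs are below) =====
def Claim_equal_detect_semantic_columns_py : Prop := ∀ (columns : List String), Dom_detect_semantic_columns_py columns → Spec_detect_semantic_columns_py columns (detect_semantic_columns_py columns)

-- ===== LEMMAS AND PROOFS =====

-- whether a rule's token list matches a column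
def pvMatch (tokens : List String) (column : String) : Bool :=
  tokens.any (fun t => PySem.Str.isIn t (PySem.Str.lower column))

lemma pvPass_fst (tokens : List String) (label : String) (rem : List String)
    (claimed : PySem.Dict String String) :
    (pvPass tokens label rem claimed).1 = rem.filter (fun c => !(pvMatch tokens c)) := by
  induction rem generalizing claimed with
  | nil => rfl
  | cons column rest ih =>
    simp only [pvPass, pvMatch, List.filter_cons]
    by_cases hm : (tokens.any fun t => PySem.Str.isIn t (PySem.Str.lower column)) = true
    · rw [if_pos hm, hm, ih]
      simp [pvMatch]
    · rw [if_neg hm]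
      rw [Bool.not_eq_true] at hm
      rw [hm]
      show (column :: (pvPass tokens label rest claimed).1) = _
      rw [ih]
      simp [pvMatch]

lemma pvPass_get? (tokens : List String) (label : String) (rem : List String)
    (claimed : PySem.Dict String String) (c : String) :
    ((pvPass tokens label rem claimed).2).get? c =
      if c ∈ rem ∧ pvMatch tokens c = true then some label else claimed.get? c := by
  induction rem generalizing claimed with
  | nil => simp [pvPass]
  | cons column rest ih =>
    simp only [pvPass, pvMatch] at *
    by_cases hm : (tokens.any fun t => PySem.Str.isIn t (PySem.Str.lower column)) = true
    · rw [if_pos hm, ih]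
      by_cases hc : c = column
      · subst hc
        by_cases hr : c ∈ rest ∧ (tokens.any fun t => PySem.Str.isIn t (PySem.Str.lower c)) = true
        · rw [if_pos hr, if_pos ⟨List.mem_cons_self, hm⟩]
        · rw [if_neg hr, PySem.Dict.get?_insert_self, if_pos ⟨List.mem_cons_self, hm⟩]
      · rw [PySem.Dict.get?_insert, if_neg hc]
        by_cases hr : c ∈ rest ∧ (tokens.any fun t => PySem.Str.isIn t (PySem.Str.lower c)) = true
        · rw [if_pos hr, if_pos ⟨List.mem_cons_of_mem _ hr.1, hr.2⟩]
        · rw [if_neg hr, if_neg (fun hx => by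
            rcases List.mem_cons.mp hx.1 with h1 | h1
            · exact hc h1
            · exact hr ⟨h1, hx.2⟩)]
    · rw [if_neg hm]
      show ((pvPass tokens label rest claimed).2).get? c = _
      rw [ih]
      by_cases hc : c = column
      · subst hc
        rw [Bool.not_eq_true] at hm
        rw [if_neg (fun hx => by rw [hm] at hx; exact Bool.false_ne_true hx.2),
            if_neg (fun hx => by rw [hm] at hx; exact Bool.false_ne_true hx.2)]
      · by_cases hr : c ∈ rest ∧ (tokens.any fun t => PySem.Str.isIn t (PySem.Str.lower c)) = true
        · rw [if_pos hr, if_pos ⟨List.mem_cons_of_mem _ hr.1, hr.2⟩]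
        · rw [if_neg hr, if_neg (fun hx => by
            rcases List.mem_cons.mp hx.1 with h1 | h1
            · exact hc h1
            · exact hr ⟨h1, hx.2⟩)]

lemma pvSieve_get? (rs : List (List String × String)) (rem : List String)
    (claimed : PySem.Dict String String) (c : String) :
    (pvSieve rs rem claimed).get? c =
      if c ∈ rem then
        (match rs.find? (fun r => pvMatch r.1 c) with
          | some r => some r.2
          | none => claimed.get? c)
      else claimed.get? c := by
  induction rs generalizing rem claimed with
  | nil => simp [pvSieve, List.find?]
  | cons r rs ih =>
    obtain ⟨tokens, label⟩ := r
    show (pvSieve rs (pvPass tokens label rem claimed).1 (pvPass tokens label rem claimed).2).get? c = _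
    rw [ih, pvPass_fst, pvPass_get?]
    simp only [List.mem_filter, List.find?_cons]
    cases hmm : pvMatch tokens c <;> by_cases hr : c ∈ rem <;> simp [hmm, hr]

-- A's ladder step written as a first-match lookup in the rule table
lemma pv_step_eq : (fun (semantic : PySem.Dict String String) (column : String) =>
    let lowered := PySem.Str.lower column
    if PySem.Str.isIn "email" lowered then semantic.insert column "email"
    else if PySem.Str.isIn "phone" lowered || PySem.Str.isIn "mobile" lowered then semantic.insert column "phone"
    else if PySem.Str.isIn "date" lowered || PySem.Str.isIn "signup" lowered then semantic.insert column "date"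
    else if PySem.Str.isIn "country" lowered then semantic.insert column "country"
    else if PySem.Str.isIn "status" lowered || PySem.Str.isIn "stage" lowered then semantic.insert column "status"
    else if (["name", "city", "state", "company"].any (fun token => PySem.Str.isIn token lowered)) then semantic.insert column "title"
    else semantic)
  = (fun (semantic : PySem.Dict String String) (column : String) =>
    match pvRules.find? (fun rule => pvMatch rule.1 column) with
    | some rule => semantic.insert column rule.2
    | none => semantic) := by
  funext semantic column
  simp only [pvRules, pvMatch, List.find?, List.any_cons, List.any_nil, Bool.or_false]
  generalize PySem.Str.isIn "email" (PySem.Str.lower column) = b0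
  generalize PySem.Str.isIn "phone" (PySem.Str.lower column) = b1
  generalize PySem.Str.isIn "mobile" (PySem.Str.lower column) = b2
  generalize PySem.Str.isIn "date" (PySem.Str.lower column) = b3
  generalize PySem.Str.isIn "signup" (PySem.Str.lower column) = b4
  generalize PySem.Str.isIn "country" (PySem.Str.lower column) = b5
  generalize PySem.Str.isIn "status" (PySem.Str.lower column) = b6
  generalize PySem.Str.isIn "stage" (PySem.Str.lower column) = b7
  generalize PySem.Str.isIn "name" (PySem.Str.lower column) = b8
  generalize PySem.Str.isIn "city" (PySem.Str.lower column) = b9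
  generalize PySem.Str.isIn "state" (PySem.Str.lower column) = b10
  generalize PySem.Str.isIn "company" (PySem.Str.lower column) = b11
  cases b0 <;> cases b1 <;> cases b2 <;> cases b3 <;> cases b4 <;> cases b5 <;> cases b6 <;> cases b7 <;> cases b8 <;> cases b9 <;> cases b10 <;> cases b11 <;> rfl

-- ===== VERDICT (by name: the statement is the Claim_ definition above) =====
theorem detect_semantic_columns_py_spec : Claim_equal_detect_semantic_columns_py := by
  intro columns _
  unfold Spec_detect_semantic_columns_py detect_semantic_columns_py detect_semantic_columns_py_alt
  rw [pv_step_eq]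
  congr 1
  apply PySem.List.foldl_congr_mem
  intro acc c hc
  rw [pvSieve_get?, if_pos hc]
  cases h : pvRules.find? (fun r => pvMatch r.1 c) with
  | some r => simp
  | none => simp [PySem.Dict.get?_empty]
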